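-- pv_equiv track=rewrite | github.com/word-ky/codesign | step_3_joint.py | get_feature_size
-- ===== SOURCE A (Python) =====
-- def get_feature_size(split_point):
--     feature_sizes = {
--         0: 224*224*64, 4: 112*112*64, 10: 56*56*128,
--         14: 28*28*256, 26: 14*14*512
--     }
--     split_int = int(split_point)
--     for k in sorted(feature_sizes.keys(), reverse=True):
--         if split_int >= k:
--             return feature_sizes[k] * 4
--     return 224*224*64*4
-- ===== SOURCE B (Python) =====
-- # Binary search over parallel sorted threshold/size tables instead of a descending linear scan.
-- _THRESHOLDS = [0, 4, 10, 14, 26]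
-- _SIZES = [224*224*64, 112*112*64, 56*56*128, 28*28*256, 14*14*512]
--
-- def get_feature_size(split_point):
--     x = int(split_point)
--     lo, hi = 0, len(_THRESHOLDS)
--     while lo < hi:
--         mid = (lo + hi) // 2
--         if x < _THRESHOLDS[mid]:
--             hi = mid
--         else:
--             lo = mid + 1
--     idx = lo - 1
--     if idx < 0:
--         idx = 0
--     return _SIZES[idx] * 4
-- ===== Notes on version B (the rewrite author's own statement) =====
-- stated objective: alternative
-- what changed: Replaces the dict plus reverse-sorted linear key scan with a hand-written bisect_right binary search over two parallel sorted tables, clamping the below-range index so negative inputs keep the smallest-threshold size.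
import Mathlib
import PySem

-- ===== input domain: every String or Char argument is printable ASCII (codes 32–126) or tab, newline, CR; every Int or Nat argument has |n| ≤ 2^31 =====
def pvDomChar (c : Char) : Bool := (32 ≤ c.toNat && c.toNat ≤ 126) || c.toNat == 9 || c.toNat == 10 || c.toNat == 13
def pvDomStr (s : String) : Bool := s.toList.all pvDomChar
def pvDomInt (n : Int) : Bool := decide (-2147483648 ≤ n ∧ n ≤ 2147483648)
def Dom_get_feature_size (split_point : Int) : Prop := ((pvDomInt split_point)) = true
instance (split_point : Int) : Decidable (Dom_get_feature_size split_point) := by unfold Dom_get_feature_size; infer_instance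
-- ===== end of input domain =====

-- B replaces A's reverse-sorted linear key scan with a binary search over parallel sorted tables (alternative structure, same values).

-- ===== PORT A =====
def pvFeatureSizes : PySem.Dict Int Int :=
  PySem.Dict.ofList [(0, 224*224*64), (4, 112*112*64), (10, 56*56*128), (14, 28*28*256), (26, 14*14*512)]

-- the for-loop with early return; getD 0 is exact because every k comes from the dict's own keys
def pvLoopA (split_int : Int) : List Int → Int
  | [] => 224*224*64*4
  | k :: ks => if split_int ≥ k then (pvFeatureSizes.getD k 0) * 4 else pvLoopA split_int ks

def get_feature_size (split_point : Int) : Int :=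
  let split_int := split_point   -- int(split_point) on an int argument
  pvLoopA split_int (PySem.List.sorted pvFeatureSizes.keys (fun k => k) true)

-- ===== PORT B =====
def pvThresholds : List Int := [0, 4, 10, 14, 26]
def pvSizes : List Int := [224*224*64, 112*112*64, 56*56*128, 28*28*256, 14*14*512]

-- the while-loop of Source B (bisect_right); getD 0 is exact because mid < hi ≤ length
def pvBisect (x : Int) (lo hi : Nat) : Nat :=
  if h : lo < hi then
    let mid := (lo + hi) / 2
    if x < pvThresholds.getD mid 0 then pvBisect x lo mid else pvBisect x (mid + 1) hi
  else lo
termination_by hi - lo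
decreasing_by all_goals omega

def get_feature_size_alt (split_point : Int) : Int :=
  let x := split_point   -- int(split_point) on an int argument
  let lo := pvBisect x 0 pvThresholds.length
  let idx : Int := (lo : Int) - 1
  let idx := if idx < 0 then 0 else idx
  (PySem.List.pyGet? pvSizes idx).getD 0 * 4   -- getD 0 exact: 0 ≤ idx < 5

-- ===== PRECONDITION & SPEC =====
def Spec_get_feature_size (split_point : Int) (out : Int) : Prop := out = get_feature_size_alt split_point
instance (split_point : Int) (out : Int) : Decidable (Spec_get_feature_size split_point out) := by unfold Spec_get_feature_size; infer_instance

-- ===== CLAIM (what is proved, stated in full; the proofs are below) =====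
def Claim_equal_get_feature_size : Prop := ∀ (split_point : Int), Dom_get_feature_size split_point → Spec_get_feature_size split_point (get_feature_size split_point)

-- ===== LEMMAS AND PROOFS =====
theorem pv_sorted_keys : PySem.List.sorted pvFeatureSizes.keys (fun k => k) true = [26, 14, 10, 4, 0] := by decide

theorem pvBisect_eval (x : Int) : pvBisect x 0 5 =
    (if x < 10 then (if x < 4 then (if x < 0 then 0 else 1) else 2)
     else (if x < 26 then (if x < 14 then 3 else 4) else 5)) := by
  unfold pvBisect
  unfold pvBisect
  unfold pvBisect
  unfold pvBisect
  norm_num [pvThresholds]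

theorem pv_a_eval (x : Int) : get_feature_size x =
    (if x ≥ 26 then 401408 else if x ≥ 14 then 802816 else if x ≥ 10 then 1605632
     else if x ≥ 4 then 3211264 else if x ≥ 0 then 12845056 else 12845056) := by
  simp only [get_feature_size, pv_sorted_keys, pvLoopA]
  rw [show pvFeatureSizes.getD 26 0 = 14*14*512 from by decide,
      show pvFeatureSizes.getD 14 0 = 28*28*256 from by decide,
      show pvFeatureSizes.getD 10 0 = 56*56*128 from by decide,
      show pvFeatureSizes.getD 4 0 = 112*112*64 from by decide,
      show pvFeatureSizes.getD 0 0 = 224*224*64 from by decide]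
  norm_num

theorem pv_b_eval (x : Int) : get_feature_size_alt x =
    (if x < 10 then (if x < 4 then (if x < 0 then 12845056 else 12845056) else 3211264)
     else (if x < 26 then (if x < 14 then 1605632 else 802816) else 401408)) := by
  simp only [get_feature_size_alt, show pvThresholds.length = 5 from rfl, pvBisect_eval]
  split_ifs <;> norm_num [pvSizes, PySem.List.pyGet?, PySem.List.pyIdx?] <;> first | omega | decide

-- ===== VERDICT (by name: the statement is the Claim_ definition above) =====
theorem get_feature_size_spec : Claim_equal_get_feature_size := by
  intro sp _
  unfold Spec_get_feature_size
  rw [pv_a_eval, pv_b_eval]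
  split_ifs <;> first | rfl | omega
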